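-- pv_equiv track=rewrite | github.com/kengiroy2-g/kenobase | scripts/analyze_loss_streaks.py | compute_loss_streaks
-- ===== SOURCE A (Python) =====
-- def is_payout(keno_type: int, hits: int) -> bool:
--     """Check if the number of hits results in a payout for given keno_type.
--
--     Payout rules (simplified):
--     - Typ-2: 2 hits
--     - Typ-3: 2+ hits
--     - Typ-4 to Typ-10: 0 hits (special payout) or 3+ hits
--     """
--     if keno_type == 2:
--         return hits >= 2
--     elif keno_type == 3:
--         return hits >= 2
--     elif keno_type >= 4:
--         # 0 hits is a special payout for Typ-4+
--         # 3+ hits is regular payout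
--         return hits == 0 or hits >= 3
--     return False
--
-- def compute_loss_streaks(hits_list: list[int], keno_type: int) -> tuple[list[int], int]:
--     """Compute all loss streak lengths and the maximum.
--
--     Returns:
--         Tuple of (list of streak lengths, max streak length)
--     """
--     streaks: list[int] = []
--     current_streak = 0
--
--     for hits in hits_list:
--         if not is_payout(keno_type, hits):
--             current_streak += 1
--         else:
--             if current_streak > 0:
--                 streaks.append(current_streak)
--             current_streak = 0
--
--     # Handle trailing streak
--     if current_streak > 0:
--         streaks.append(current_streak)
--
--     max_streak = max(streaks) if streaks else 0
--     return streaks, max_streak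
-- ===== SOURCE B (Python) =====
-- def is_payout(keno_type: int, hits: int) -> bool:
--     if keno_type == 2:
--         return hits >= 2
--     elif keno_type == 3:
--         return hits >= 2
--     elif keno_type >= 4:
--         return hits == 0 or hits >= 3
--     return False
--
--
-- def compute_loss_streaks(hits_list, keno_type):
--     # Boundary-index method: a loss streak is the gap between two consecutive
--     # payout positions (with virtual payouts at -1 and len(hits_list)).
--     n = len(hits_list)
--     bounds = [-1] + [i for i, h in enumerate(hits_list) if is_payout(keno_type, h)] + [n]
--     streaks = [b - a - 1 for a, b in zip(bounds, bounds[1:]) if b - a > 1]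
--     return streaks, (max(streaks) if streaks else 0)
-- ===== Notes on version B (the rewrite author's own statement) =====
-- stated objective: alternative
-- what changed: Replaced A's running-accumulator scan (mutable current_streak with in-loop and trailing flushes) by a boundary-index method: collect the indices of the payout draws, bracket them with virtual payouts at -1 and len(hits_list), and read each loss streak off as the gap minus one between consecutive boundary indices.
import Mathlib
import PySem

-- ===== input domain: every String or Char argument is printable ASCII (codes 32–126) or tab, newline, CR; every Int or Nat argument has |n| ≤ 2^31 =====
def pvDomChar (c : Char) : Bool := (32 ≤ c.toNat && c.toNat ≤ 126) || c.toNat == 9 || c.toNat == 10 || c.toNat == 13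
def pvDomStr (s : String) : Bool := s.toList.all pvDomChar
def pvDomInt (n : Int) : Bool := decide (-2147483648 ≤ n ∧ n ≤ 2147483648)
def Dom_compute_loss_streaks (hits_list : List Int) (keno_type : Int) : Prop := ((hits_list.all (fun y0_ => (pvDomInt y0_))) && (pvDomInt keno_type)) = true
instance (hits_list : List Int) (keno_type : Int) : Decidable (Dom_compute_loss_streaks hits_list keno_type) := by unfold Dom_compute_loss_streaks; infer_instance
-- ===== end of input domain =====

-- B replaces A's running-accumulator scan by a boundary-index method: collect the
-- positions of the payout draws (with virtual payouts at -1 and n) and read each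
-- loss streak off as the gap between two consecutive boundaries (alternative).

-- ===== PORT A =====
def is_payout (keno_type : Int) (hits : Int) : Bool :=
  if keno_type = 2 then decide (2 ≤ hits)
  else if keno_type = 3 then decide (2 ≤ hits)
  else if 4 ≤ keno_type then (decide (hits = 0) || decide (3 ≤ hits))
  else false

-- one iteration of A's for-loop body, on the already-computed loss flag
def pvStepA (st : List Int × Int) (loss : Bool) : List Int × Int :=
  if loss then (st.1, st.2 + 1)
  else if 0 < st.2 then (st.1 ++ [st.2], 0) else (st.1, 0)

-- A's trailing-streak handling after the loop
def pvFin (st : List Int × Int) : List Int :=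
  if 0 < st.2 then st.1 ++ [st.2] else st.1

def compute_loss_streaks (hits_list : List Int) (keno_type : Int) : List Int × Int :=
  let streaks := pvFin (hits_list.foldl (fun st h => pvStepA st (!is_payout keno_type h)) ([], 0))
  (streaks, (PySem.List.max? streaks (fun x => x)).getD 0)

-- ===== PORT B =====
def compute_loss_streaks_alt (hits_list : List Int) (keno_type : Int) : List Int × Int :=
  let n : Int := hits_list.length
  let bounds : List Int :=
    -1 :: ((PySem.List.enumerate hits_list).filterMap
      (fun p => if is_payout keno_type p.2 then some p.1 else none)) ++ [n]
  let streaks := (bounds.zip (bounds.drop 1)).filterMap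
    (fun ab => if 1 < ab.2 - ab.1 then some (ab.2 - ab.1 - 1) else none)
  (streaks, (PySem.List.max? streaks (fun x => x)).getD 0)

-- ===== PRECONDITION & SPEC =====
def Spec_compute_loss_streaks (hits_list : List Int) (keno_type : Int) (out : List Int × Int) : Prop := out = compute_loss_streaks_alt hits_list keno_type
instance (hits_list : List Int) (keno_type : Int) (out : List Int × Int) : Decidable (Spec_compute_loss_streaks hits_list keno_type out) := by unfold Spec_compute_loss_streaks; infer_instance

-- ===== CLAIM (what is proved, stated in full; the proofs are below) =====
def Claim_equal_compute_loss_streaks : Prop := ∀ (hits_list : List Int) (keno_type : Int), Dom_compute_loss_streaks hits_list keno_type → Spec_compute_loss_streaks hits_list keno_type (compute_loss_streaks hits_list keno_type)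

-- ===== LEMMAS AND PROOFS =====

@[simp] lemma pvStepA_true (st : List Int × Int) : pvStepA st true = (st.1, st.2 + 1) := rfl

@[simp] lemma pvStepA_false (st : List Int × Int) :
    pvStepA st false = if 0 < st.2 then (st.1 ++ [st.2], 0) else (st.1, 0) := rfl

-- reference: runs of a flag list as (key, run length) pairs
def pvGroupRuns : List Bool → List (Bool × Int)
  | [] => []
  | b :: rest =>
    (b, (rest.takeWhile (· == b)).length + 1) :: pvGroupRuns (rest.dropWhile (· == b))
  termination_by l => l.length
  decreasing_by
    have := List.length_dropWhile_le (· == b) rest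
    simp; omega

-- reference: lengths of the true (loss) runs of a flag list
def pvLens (l : List Bool) : List Int :=
  (pvGroupRuns l).filterMap (fun kg => if kg.1 then some kg.2 else none)

lemma pvLens_dropWhile_false (t : List Bool) :
    pvLens (t.dropWhile (· == false)) = pvLens t := by
  cases t with
  | nil => rfl
  | cons b t' =>
    cases b with
    | true => simp [List.dropWhile]
    | false =>
      conv_rhs => rw [pvLens, pvGroupRuns]
      simp [List.dropWhile, List.filterMap, pvLens]

lemma pvLens_false_cons (t : List Bool) : pvLens (false :: t) = pvLens t := by
  rw [pvLens, pvGroupRuns]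
  simp only [List.filterMap, Bool.false_eq_true, if_false]
  rw [← pvLens, pvLens_dropWhile_false]

lemma pvTakeWhile_repl_true (m : Nat) (t : List Bool) :
    (List.replicate m true ++ false :: t).takeWhile (· == true) = List.replicate m true := by
  induction m with
  | zero => simp
  | succ k ih => simp [List.replicate_succ, List.takeWhile]

lemma pvDropWhile_repl_true (m : Nat) (t : List Bool) :
    (List.replicate m true ++ false :: t).dropWhile (· == true) = false :: t := by
  induction m with
  | zero => simp
  | succ k ih => simp [List.replicate_succ, List.dropWhile]

lemma pvLens_repl_true_false (m : Nat) (t : List Bool) :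
    pvLens (List.replicate (m + 1) true ++ false :: t) = ((m : Int) + 1) :: pvLens t := by
  rw [List.replicate_succ]
  rw [show (true :: List.replicate m true) ++ false :: t = true :: (List.replicate m true ++ false :: t) by simp]
  rw [pvLens, pvGroupRuns]
  rw [pvTakeWhile_repl_true, pvDropWhile_repl_true]
  simp only [List.filterMap, List.length_replicate, reduceIte]
  rw [← pvLens, pvLens_false_cons]

lemma pvLens_repl_true (n : Nat) :
    pvLens (List.replicate n true) = if n = 0 then [] else [(n : Int)] := by
  cases n with
  | zero => simp [pvLens, pvGroupRuns]
  | succ m =>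
    rw [List.replicate_succ, pvLens, pvGroupRuns]
    have h1 : (List.replicate m true).takeWhile (· == true) = List.replicate m true := by simp
    have h2 : (List.replicate m true).dropWhile (· == true) = [] := by simp
    rw [h1, h2]
    simp [List.filterMap, pvGroupRuns]

-- the invariant of A's loop: acc is the list flushed so far, n the current streak length
lemma pvKey (l : List Bool) : ∀ (acc : List Int) (n : Nat),
    pvFin (l.foldl pvStepA (acc, (n : Int)))
    = acc ++ pvLens (List.replicate n true ++ l) := by
  induction l with
  | nil =>
    intro acc n
    simp only [List.foldl_nil, List.append_nil, pvFin]
    rw [pvLens_repl_true]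
    cases n with
    | zero => simp
    | succ m => simp
  | cons b t ih =>
    intro acc n
    cases b with
    | true =>
      simp only [List.foldl_cons, pvStepA_true]
      have hc : ((n : Int) + 1) = ((n + 1 : Nat) : Int) := by push_cast; ring
      rw [hc, ih acc (n + 1), List.replicate_succ']
      simp
    | false =>
      simp only [List.foldl_cons, pvStepA_false]
      cases n with
      | zero =>
        rw [if_neg (by simp)]
        have := ih acc 0
        simp only [Nat.cast_zero] at this
        rw [this]
        simp [pvLens_false_cons]
      | succ m =>
        rw [if_pos (by push_cast; omega)]
        have hthis := ih (acc ++ [((m + 1 : Nat) : Int)]) 0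
        simp only [Nat.cast_zero, List.replicate_zero, List.nil_append] at hthis
        rw [hthis, pvLens_repl_true_false]
        push_cast
        simp

-- B-side reference: the positions (from s) of the payout (false-flag) draws
def pvWins : List Bool → Int → List Int
  | [], _ => []
  | true :: t, s => pvWins t (s + 1)
  | false :: t, s => s :: pvWins t (s + 1)

-- B-side reference: gaps > 1 between consecutive boundaries, minus one each
def pvGaps : Int → List Int → Int → List Int
  | p, [], n => if 1 < n - p then [n - p - 1] else []
  | p, w :: ws, n => if 1 < w - p then (w - p - 1) :: pvGaps w ws n else pvGaps w ws n

-- B's enumerate/filterMap computes pvWins of the flag list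
lemma pvEnumWins (keno_type : Int) : ∀ (l : List Int) (s : Int),
    (PySem.List.enumerate l s).filterMap
      (fun p => if is_payout keno_type p.2 then some p.1 else none)
    = pvWins (l.map (fun h => !is_payout keno_type h)) s := by
  intro l
  induction l with
  | nil => intro s; simp [PySem.List.enumerate_nil, pvWins]
  | cons h t ih =>
    intro s
    rw [PySem.List.enumerate_cons]
    by_cases hp : is_payout keno_type h
    · simp [List.filterMap, hp, pvWins, ih]
    · simp [List.filterMap, hp, pvWins, ih]

-- B's zip/filterMap over the boundary list computes pvGaps
lemma pvZipGaps : ∀ (ws : List Int) (p n : Int),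
    (((p :: ws ++ [n]).zip ((p :: ws ++ [n]).drop 1)).filterMap
      (fun ab => if 1 < ab.2 - ab.1 then some (ab.2 - ab.1 - 1) else none))
    = pvGaps p ws n := by
  intro ws
  induction ws with
  | nil => intro p n; by_cases h : 1 < n - p <;> simp [List.zip, List.filterMap, pvGaps, h]
  | cons w ws' ih =>
    intro p n
    have hz := ih w n
    by_cases h : 1 < w - p <;>
      simp only [List.cons_append, List.drop_succ_cons, List.drop_zero, List.zip_cons_cons,
        List.filterMap, pvGaps, h, if_true, if_false] at hz ⊢ <;>
      rw [← hz]

-- main B-side invariant: gaps between payout positions = loss-run lengths,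
-- with p the previous boundary and k the pending losses since then
lemma pvGapsLens : ∀ (l : List Bool) (p : Int) (k : Nat),
    pvGaps p (pvWins l (p + k + 1)) (p + k + l.length + 1)
    = pvLens (List.replicate k true ++ l) := by
  intro l
  induction l with
  | nil =>
    intro p k
    simp only [pvWins, List.length_nil, Nat.cast_zero, add_zero, List.append_nil, pvGaps]
    rw [pvLens_repl_true]
    rcases Nat.eq_zero_or_pos k with hk | hk
    · subst hk; norm_num
    · rw [if_pos (by omega), if_neg (by omega)]
      congr 1
      omega
  | cons b t ih =>
    intro p k
    cases b with
    | true =>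
      simp only [pvWins, List.length_cons]
      rw [show (p + (k : Int) + 1 + 1 : Int) = p + ((k + 1 : Nat) : Int) + 1 by push_cast; ring]
      rw [show (p + (k : Int) + ((t.length + 1 : Nat) : Int) + 1 : Int)
            = p + ((k + 1 : Nat) : Int) + (t.length : Int) + 1 by push_cast; ring]
      rw [ih p (k + 1), List.replicate_succ']
      simp
    | false =>
      simp only [pvWins, List.length_cons]
      rw [pvGaps]
      rcases Nat.eq_zero_or_pos k with hk | hk
      · subst hk
        rw [if_neg (by omega)]
        rw [show (p + ((0 : Nat) : Int) + 1 + 1 : Int)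
              = (p + ((0 : Nat) : Int) + 1) + ((0 : Nat) : Int) + 1 by push_cast; ring]
        rw [show (p + ((0 : Nat) : Int) + ((t.length + 1 : Nat) : Int) + 1 : Int)
              = (p + ((0 : Nat) : Int) + 1) + ((0 : Nat) : Int) + (t.length : Int) + 1 by push_cast; ring]
        rw [ih (p + ((0 : Nat) : Int) + 1) 0]
        simp [pvLens_false_cons]
      · obtain ⟨m, rfl⟩ := Nat.exists_eq_succ_of_ne_zero (by omega : k ≠ 0)
        rw [if_pos (by omega)]
        rw [pvLens_repl_true_false]
        congr 1
        · omega
        · rw [show (p + ((m + 1 : Nat) : Int) + 1 + 1 : Int)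
                = (p + ((m + 1 : Nat) : Int) + 1) + ((0 : Nat) : Int) + 1 by push_cast; ring]
          rw [show (p + ((m + 1 : Nat) : Int) + ((t.length + 1 : Nat) : Int) + 1 : Int)
                = (p + ((m + 1 : Nat) : Int) + 1) + ((0 : Nat) : Int) + (t.length : Int) + 1 by push_cast; ring]
          rw [ih (p + ((m + 1 : Nat) : Int) + 1) 0]
          simp

-- ===== VERDICT (by name: the statement is the Claim_ definition above) =====
theorem compute_loss_streaks_spec : Claim_equal_compute_loss_streaks := by
  intro hits_list keno_type _
  unfold Spec_compute_loss_streaks compute_loss_streaks compute_loss_streaks_alt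
  have hfold : hits_list.foldl (fun st h => pvStepA st (!is_payout keno_type h)) ([], 0)
      = (hits_list.map (fun h => !is_payout keno_type h)).foldl pvStepA ([], 0) := by
    rw [List.foldl_map]
  set flags := hits_list.map (fun h => !is_payout keno_type h) with hf
  have hA : pvFin (flags.foldl pvStepA ([], 0)) = pvLens flags := by
    simpa using pvKey flags [] 0
  have hEnum : (PySem.List.enumerate hits_list).filterMap
      (fun p => if is_payout keno_type p.2 then some p.1 else none) = pvWins flags 0 := by
    rw [hf]; exact pvEnumWins keno_type hits_list 0
  have hGL : pvGaps (-1) (pvWins flags 0) (hits_list.length : Int) = pvLens flags := by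
    have h := pvGapsLens flags (-1) 0
    have hlen : flags.length = hits_list.length := by rw [hf]; simp
    rw [show ((-1 : Int) + ((0 : Nat) : Int) + 1) = (0 : Int) by norm_num] at h
    rw [show ((-1 : Int) + ((0 : Nat) : Int) + (flags.length : Int) + 1) = (flags.length : Int) by push_cast; ring] at h
    simpa [hlen] using h
  simp only [hfold, hA, hEnum, pvZipGaps, hGL]
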